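-- pv_equiv track=rewrite | github.com/BioinfoMachineLearning/dagmsa | scripts/generateMultimerTemplates_v_new.py | findUniqueNodes
-- ===== SOURCE A (Python) =====
-- def findUniqueNodes(all_indices):
--     new_list=[]
--     dag_dict={}
--     for i in range(len(all_indices)):
--         for chain_nodes in all_indices[i]:
--             new_list.append(chain_nodes[0:4])
--             if dag_dict.get(chain_nodes[0:4])==None:
--                 dag_dict[chain_nodes[0:4]]=[]
--             dag_dict[chain_nodes[0:4]].append(chain_nodes)
--
--
--     return sorted(list(set(new_list))), dag_dict
-- ===== SOURCE B (Python) =====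
-- def findUniqueNodes(all_indices):
--     flat = [cn for chain in all_indices for cn in chain]
--     seen = []
--     for cn in flat:
--         if cn[0:4] not in seen:
--             seen.append(cn[0:4])
--     dag_dict = {k: [cn for cn in flat if cn[0:4] == k] for k in seen}
--     return sorted(seen), dag_dict
-- ===== Notes on version B (the rewrite author's own statement) =====
-- stated objective: simpler
-- what changed: B drops A's incremental dict grouping, duplicate key list and set dedup: it dedups the keys in first-occurrence order with a plain membership loop, then builds each dict entry by its own filter pass over the flattened nodes (staged passes instead of one mutating-dict pass).
import Mathlib
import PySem

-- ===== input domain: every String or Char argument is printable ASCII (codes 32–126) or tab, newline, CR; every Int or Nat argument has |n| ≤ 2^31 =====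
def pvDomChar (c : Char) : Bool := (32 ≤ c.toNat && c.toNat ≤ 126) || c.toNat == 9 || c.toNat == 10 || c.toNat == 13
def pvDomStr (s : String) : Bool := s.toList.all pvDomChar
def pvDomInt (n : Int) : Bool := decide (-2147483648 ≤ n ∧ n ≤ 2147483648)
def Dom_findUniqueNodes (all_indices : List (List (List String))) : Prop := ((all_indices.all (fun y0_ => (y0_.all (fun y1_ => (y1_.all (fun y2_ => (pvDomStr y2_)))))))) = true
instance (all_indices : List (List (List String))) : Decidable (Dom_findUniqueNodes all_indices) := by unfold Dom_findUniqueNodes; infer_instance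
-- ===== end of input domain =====

-- B replaces A's single-pass dict grouping with a staged, plainer decomposition: dedup the keys
-- in first-occurrence order, then build each group by its own filter pass (simpler; no dict
-- mutation while looping, at the cost of one scan per distinct key).

-- ===== PORT A =====
-- the accumulation loop of A (new_list, dag_dict)
def findUniqueNodesLoop (all_indices : List (List (List String))) : List (List String) × PySem.Dict (List String) (List (List String)) :=
  (PySem.List.pyRange 0 all_indices.length 1).foldl
    (fun (st : List (List String) × PySem.Dict (List String) (List (List String))) i =>
      (PySem.List.pyGetD all_indices i []).foldl
        (fun st chain_nodes =>
          let key := PySem.List.slice chain_nodes (some 0) (some 4)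
          let new_list := st.1 ++ [key]
          let d := if PySem.Dict.get? st.2 key = none then PySem.Dict.insert st.2 key [] else st.2
          let d := PySem.Dict.modify d key [] (fun v => v ++ [chain_nodes])
          (new_list, d)) st)
    ([], PySem.Dict.empty)

def findUniqueNodes (all_indices : List (List (List String))) : List (List String) × (List (List String × List (List String))) :=
  let st := findUniqueNodesLoop all_indices
  (PySem.List.sorted (PySem.Set.ofList st.1) (fun x => x) false, PySem.Dict.items st.2)

-- ===== PORT B =====
def findUniqueNodes_alt (all_indices : List (List (List String))) : List (List String) × (List (List String × List (List String))) :=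
  let flat := all_indices.flatten
  let seen := flat.foldl
    (fun (seen : List (List String)) cn =>
      if seen.contains (PySem.List.slice cn (some 0) (some 4)) then seen
      else seen ++ [PySem.List.slice cn (some 0) (some 4)]) []
  let dag_dict := seen.map
    (fun k => (k, flat.filter (fun cn => PySem.List.slice cn (some 0) (some 4) == k)))
  (PySem.List.sorted seen (fun x => x) false, dag_dict)

-- ===== PRECONDITION & SPEC =====
def Spec_findUniqueNodes (all_indices : List (List (List String))) (out : List (List String) × (List (List String × List (List String)))) : Prop := out = findUniqueNodes_alt all_indices
instance (all_indices : List (List (List String))) (out : List (List String) × (List (List String × List (List String)))) : Decidable (Spec_findUniqueNodes all_indices out) := by unfold Spec_findUniqueNodes; infer_instance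

-- ===== CLAIM (what is proved, stated in full; the proofs are below) =====
def Claim_equal_findUniqueNodes : Prop := ∀ (all_indices : List (List (List String))), Dom_findUniqueNodes all_indices → Spec_findUniqueNodes all_indices (findUniqueNodes all_indices)

-- ===== LEMMAS AND PROOFS =====

theorem dict_eq_of_items_eq {κ ν : Type} (d₁ d₂ : PySem.Dict κ ν)
    (h : d₁.items = d₂.items) : d₁ = d₂ := by
  cases d₁; cases d₂; cases h; rfl

-- the 'for i in range(len(xs)): for x in xs[i]:' loop is the loop over the flattened list
theorem nested_fold_eq_flatten_fold {α β : Type} (xs : List (List α)) (f : β → α → β) (init : β) :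
    (PySem.List.pyRange 0 xs.length 1).foldl (fun st i => (PySem.List.pyGetD xs i []).foldl f st) init
      = xs.flatten.foldl f init := by
  induction xs using List.reverseRecOn generalizing init with
  | nil => rfl
  | append_singleton xs x ih =>
    have hlen : ((xs ++ [x]).length : Int) = (xs.length : Int) + 1 := by simp
    rw [hlen, PySem.List.pyRange_one_succ_right (by positivity), List.foldl_append]
    have hcongr :
        (PySem.List.pyRange 0 (xs.length : Int) 1).foldl
            (fun st i => (PySem.List.pyGetD (xs ++ [x]) i []).foldl f st) init
          = (PySem.List.pyRange 0 (xs.length : Int) 1).foldl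
            (fun st i => (PySem.List.pyGetD xs i []).foldl f st) init := by
      refine PySem.List.foldl_congr_mem _ _ _ _ ?_
      intro acc i hi
      have hmem := PySem.List.mem_pyRange_one.1 hi
      have hn : i.toNat < xs.length := by omega
      have h1 : PySem.List.pyGetD (xs ++ [x]) i [] = (xs ++ [x])[i.toNat]'(by simp; omega) :=
        PySem.List.pyGetD_eq_getElem _ _ hmem.1 (by simp; omega)
      have h2 : PySem.List.pyGetD xs i [] = xs[i.toNat] :=
        PySem.List.pyGetD_eq_getElem _ _ hmem.1 (by exact_mod_cast hmem.2)
      rw [h1, h2, List.getElem_append_left hn]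
    rw [hcongr, ih]
    have hx : PySem.List.pyGetD (xs ++ [x]) (xs.length : Int) [] = x := by
      rw [PySem.List.pyGetD_eq_getElem (xs ++ [x]) (i := (xs.length : Int)) []
        (by positivity) (by simp)]
      simp
    simp only [List.foldl, hx, List.flatten_append, List.flatten_cons, List.flatten_nil,
      List.append_nil, List.foldl_append]

-- A's 'ensure the key with d[k]=[] then append' equals the one-step modify
theorem insert_then_modify (d : PySem.Dict (List String) (List (List String)))
    (k : List String) (g : List (List String) → List (List String)) :
    PySem.Dict.modify (if PySem.Dict.get? d k = none then PySem.Dict.insert d k [] else d) k [] g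
      = PySem.Dict.modify d k [] g := by
  by_cases h : PySem.Dict.get? d k = none
  · have hc : PySem.Dict.contains d k = false := (PySem.Dict.get?_eq_none_iff_contains d k).1 h
    rw [if_pos h]
    simp only [PySem.Dict.modify]
    rw [PySem.Dict.getD_insert_self, PySem.Dict.getD_of_not_contains _ _ hc]
    apply dict_eq_of_items_eq
    rw [PySem.Dict.items_insert_of_contains _ _ (PySem.Dict.contains_insert_self d k []),
        PySem.Dict.items_insert_of_not_contains _ _ hc,
        PySem.Dict.items_insert_of_not_contains _ _ hc]
    have hid : ∀ p ∈ d.items, (if (p.1 == k) = true then (k, g []) else p) = p := by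
      intro p hp
      have : (p.1 == k) = false := by
        by_contra hne
        have : d.contains k = true := by
          simp only [PySem.Dict.contains, List.any_eq_true]
          exact ⟨p, hp, by simpa using hne⟩
        simp [this] at hc
      simp [this]
    rw [List.map_append, List.map_congr_left hid, List.map_id']
    simp
  · rw [if_neg h]

-- A's dict after the loop, as a fold over the flattened node list
def fwdDict (flat : List (List String)) : PySem.Dict (List String) (List (List String)) :=
  flat.foldl
    (fun d chain_nodes =>
      PySem.Dict.modify d (PySem.List.slice chain_nodes (some 0) (some 4)) [] (fun v => v ++ [chain_nodes]))
    PySem.Dict.empty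

theorem loop_eq (all_indices : List (List (List String))) :
    findUniqueNodesLoop all_indices
      = (all_indices.flatten.map (fun cn => PySem.List.slice cn (some 0) (some 4)),
         fwdDict all_indices.flatten) := by
  unfold findUniqueNodesLoop fwdDict
  rw [nested_fold_eq_flatten_fold]
  have hstep : ∀ (st : List (List String) × PySem.Dict (List String) (List (List String)))
      (cn : List String),
      (let key := PySem.List.slice cn (some 0) (some 4)
       let new_list := st.1 ++ [key]
       let d := if PySem.Dict.get? st.2 key = none then PySem.Dict.insert st.2 key [] else st.2
       let d := PySem.Dict.modify d key [] (fun v => v ++ [cn])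
       (new_list, d))
      = (st.1 ++ [PySem.List.slice cn (some 0) (some 4)],
         PySem.Dict.modify st.2 (PySem.List.slice cn (some 0) (some 4)) [] (fun v => v ++ [cn])) := by
    intro st cn
    simp only []
    rw [insert_then_modify]
  calc List.foldl _ ([], PySem.Dict.empty) all_indices.flatten
      = List.foldl (fun (st : List (List String) × PySem.Dict (List String) (List (List String))) cn =>
          (st.1 ++ [PySem.List.slice cn (some 0) (some 4)],
           PySem.Dict.modify st.2 (PySem.List.slice cn (some 0) (some 4)) [] (fun v => v ++ [cn])))
          ([], PySem.Dict.empty) all_indices.flatten := by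
        exact PySem.List.foldl_congr_mem _ _ _ _ (fun acc x _ => hstep acc x)
    _ = _ := by
        rw [PySem.List.foldl_prod_mk
            (f := fun (l : List (List String)) cn => l ++ [PySem.List.slice cn (some 0) (some 4)])
            (g := fun (d : PySem.Dict (List String) (List (List String))) cn =>
              PySem.Dict.modify d (PySem.List.slice cn (some 0) (some 4)) [] (fun v => v ++ [cn]))]
        rw [PySem.List.foldl_append_singleton_eq_map]
        simp

-- B's seen-loop is the ordered dedup of the key list, i.e. set(new_list) in first-occurrence order
theorem seen_eq (flat : List (List String)) :
    flat.foldl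
      (fun (seen : List (List String)) cn =>
        if seen.contains (PySem.List.slice cn (some 0) (some 4)) then seen
        else seen ++ [PySem.List.slice cn (some 0) (some 4)]) []
      = PySem.Set.ofList (flat.map (fun cn => PySem.List.slice cn (some 0) (some 4))) := by
  rw [PySem.Set.ofList_eq_foldl, List.foldl_map]
  rfl

-- the keys of A's dict are the first occurrences of the keys (proved on the fold)
theorem keys_fold (flat : List (List String)) (d : PySem.Dict (List String) (List (List String))) :
    (flat.foldl
      (fun d cn =>
        PySem.Dict.modify d (PySem.List.slice cn (some 0) (some 4)) [] (fun v => v ++ [cn])) d).keys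
      = flat.foldl (fun s cn => PySem.Set.add s (PySem.List.slice cn (some 0) (some 4))) d.keys := by
  induction flat generalizing d with
  | nil => rfl
  | cons cn rest ih =>
    simp only [List.foldl]
    rw [ih]
    congr 1
    rw [PySem.Dict.keys_modify]
    by_cases hc : PySem.Dict.contains d (PySem.List.slice cn (some 0) (some 4)) = true
    · rw [PySem.Dict.keys_insert_of_contains _ _ hc]
      have hcont : d.keys.contains (PySem.List.slice cn (some 0) (some 4)) = true :=
        List.contains_iff_mem.mpr ((PySem.Dict.contains_iff_mem_keys d _).1 hc)
      simp only [PySem.Set.add, PySem.Set.contains]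
      rw [if_pos hcont]
    · rw [Bool.not_eq_true] at hc
      rw [PySem.Dict.keys_insert_of_not_contains _ _ hc]
      have hmem : PySem.List.slice cn (some 0) (some 4) ∉ d.keys := by
        intro hm
        have ht := (PySem.Dict.contains_iff_mem_keys d _).2 hm
        rw [hc] at ht
        exact Bool.false_ne_true ht
      have hcont : d.keys.contains (PySem.List.slice cn (some 0) (some 4)) = false := by
        rw [← Bool.not_eq_true, List.contains_iff_mem]
        exact hmem
      simp only [PySem.Set.add, PySem.Set.contains]
      rw [if_neg (by intro ht; rw [hcont] at ht; exact Bool.false_ne_true ht)]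

theorem fwdDict_keys (flat : List (List String)) :
    PySem.Set.ofList (flat.map (fun cn => PySem.List.slice cn (some 0) (some 4)))
      = (fwdDict flat).keys := by
  unfold fwdDict
  rw [keys_fold, PySem.Set.ofList_eq_foldl, List.foldl_map, PySem.Dict.keys_empty]

theorem fwdDict_getD (flat : List (List String)) (k : List String) :
    (fwdDict flat).getD k []
      = flat.filter (fun cn => PySem.List.slice cn (some 0) (some 4) == k) := by
  unfold fwdDict
  have hmap : ((flat.map (fun cn => (PySem.List.slice cn (some 0) (some 4), cn))).foldl
      (fun d (p : List String × List String) => PySem.Dict.modify d p.1 [] (fun v => v ++ [p.2]))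
      PySem.Dict.empty)
    = (flat.foldl
      (fun d cn =>
        PySem.Dict.modify d (PySem.List.slice cn (some 0) (some 4)) [] (fun v => v ++ [cn]))
      PySem.Dict.empty) := by
    rw [List.foldl_map]
  rw [← hmap, PySem.Dict.getD_foldl_modify_append]
  simp [List.filter_map, Function.comp_def]

theorem fwdDict_nodup_keys (flat : List (List String)) : (fwdDict flat).keys.Nodup := by
  unfold fwdDict
  exact PySem.Dict.nodup_keys_foldl_modify_key flat
    (fun cn => PySem.List.slice cn (some 0) (some 4)) [] (fun d cn v => v ++ [cn])
    PySem.Dict.empty (by simp)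

theorem fwdDict_items (flat : List (List String)) :
    (fwdDict flat).items
      = (PySem.Set.ofList (flat.map (fun cn => PySem.List.slice cn (some 0) (some 4)))).map
          (fun k => (k, flat.filter (fun cn => PySem.List.slice cn (some 0) (some 4) == k))) := by
  rw [PySem.Dict.items_eq_map_keys _ (fwdDict_nodup_keys flat) [], fwdDict_keys]
  exact List.map_congr_left (fun k _ => by rw [fwdDict_getD])

-- ===== VERDICT (by name: the statement is the Claim_ definition above) =====
theorem findUniqueNodes_spec : Claim_equal_findUniqueNodes := by
  intro all_indices _
  unfold Spec_findUniqueNodes findUniqueNodes findUniqueNodes_alt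
  rw [loop_eq]
  simp only [seen_eq]
  rw [fwdDict_items]
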